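-- pv_equiv track=rewrite | github.com/zjq12333/hermes-agent | gateway/platforms/yuanbao.py | split_into_atoms
-- ===== SOURCE A (Python) =====
-- def split_into_atoms(text: str) -> list[str]:
--     """
--     Split text into a list of "atomic blocks", each being an indivisible logical unit:
--
--     - Code block (fence): from opening ``` to closing ``` (including fence lines)
--     - Table: consecutive |...| lines forming a whole segment
--     - Normal paragraph: plain text segments separated by blank lines
--
--     Blank lines serve as separators and are not included in any atomic block.
--
--     Args:
--         text: Markdown text to split
--
--     Returns:
--         List of atomic block strings (all non-empty)
--     """
--     lines = text.split('\n')
--     atoms: list[str] = []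
--
--     current_lines: list[str] = []
--     in_fence = False
--
--     def _is_table_line(line: str) -> bool:
--         stripped = line.strip()
--         return stripped.startswith('|') and stripped.endswith('|')
--
--     def _flush_current() -> None:
--         if current_lines:
--             atom = '\n'.join(current_lines)
--             if atom.strip():
--                 atoms.append(atom)
--             current_lines.clear()
--
--     for line in lines:
--         if in_fence:
--             current_lines.append(line)
--             if line.startswith('```') and len(current_lines) > 1:
--                 in_fence = False
--                 _flush_current()
--         elif line.startswith('```'):
--             _flush_current()
--             in_fence = True
--             current_lines.append(line)
--         elif _is_table_line(line):
--             if current_lines and not _is_table_line(current_lines[-1]):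
--                 _flush_current()
--             current_lines.append(line)
--         elif line.strip() == '':
--             _flush_current()
--         else:
--             if current_lines and _is_table_line(current_lines[-1]):
--                 _flush_current()
--             current_lines.append(line)
--
--     _flush_current()
--
--     return atoms
-- ===== SOURCE B (Python) =====
-- def split_into_atoms(text: str) -> list[str]:
--     """Index-driven block scanner: at each position, identify the block type
--     (fence / table / blank / paragraph) and scan forward to its end in one
--     inner loop, emitting the joined block if non-empty after strip."""
--     lines = text.split('\n')
--     n = len(lines)
--
--     def _is_table(line: str) -> bool:
--         s = line.strip()
--         return s.startswith('|') and s.endswith('|')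
--
--     atoms: list[str] = []
--     i = 0
--     while i < n:
--         line = lines[i]
--         if line.startswith('```'):
--             j = i + 1
--             while j < n and not lines[j].startswith('```'):
--                 j += 1
--             end = j + 1 if j < n else n
--             block = '\n'.join(lines[i:end])
--             if block.strip():
--                 atoms.append(block)
--             i = end
--         elif _is_table(line):
--             j = i + 1
--             while j < n and _is_table(lines[j]):
--                 j += 1
--             block = '\n'.join(lines[i:j])
--             if block.strip():
--                 atoms.append(block)
--             i = j
--         elif line.strip() == '':
--             i += 1
--         else:
--             j = i + 1
--             while j < n and not lines[j].startswith('```') and not _is_table(lines[j]) and lines[j].strip() != '':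
--                 j += 1
--             block = '\n'.join(lines[i:j])
--             if block.strip():
--                 atoms.append(block)
--             i = j
--     return atoms
-- ===== Notes on version B (the rewrite author's own statement) =====
-- stated objective: alternative
-- what changed: Replaced the single-pass state machine (in_fence flag, current_lines accumulator, flush-on-transition) by an index-driven outer loop that, at each block start, classifies the line and runs one inner forward scan to the block's end (fence close / end of table run / end of paragraph run) before emitting it.
import Mathlib
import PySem

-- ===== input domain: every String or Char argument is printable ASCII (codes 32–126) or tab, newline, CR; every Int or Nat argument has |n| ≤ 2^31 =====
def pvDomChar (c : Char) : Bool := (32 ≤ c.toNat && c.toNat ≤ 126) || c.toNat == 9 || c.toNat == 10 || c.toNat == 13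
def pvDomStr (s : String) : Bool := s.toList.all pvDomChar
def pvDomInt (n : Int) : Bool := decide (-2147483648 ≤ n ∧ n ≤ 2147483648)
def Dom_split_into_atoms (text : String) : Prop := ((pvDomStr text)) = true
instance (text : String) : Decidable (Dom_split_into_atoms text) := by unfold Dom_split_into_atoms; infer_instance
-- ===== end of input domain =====

-- B replaces A's single-pass flag/accumulator state machine by an index-driven outer loop with
-- one inner forward scan per block type (objective: alternative decomposition, same cost).

-- ===== PORT A =====
-- _is_table_line (nested helper, identical in both Pythons)
def pvIsTable (line : String) : Bool :=
  let stripped := PySem.Str.strip line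
  PySem.Str.startswith stripped "|" && PySem.Str.endswith stripped "|"

-- _flush_current: returns (new atoms, cleared current_lines)
def pvFlushA (atoms cur : List String) : List String × List String :=
  if cur ≠ [] then
    let atom := PySem.Str.join "\n" cur
    if PySem.Str.strip atom ≠ "" then (atoms ++ [atom], []) else (atoms, [])
  else (atoms, cur)

-- one iteration of A's for-loop; state = (atoms, current_lines, in_fence)
def pvStepA (st : List String × List String × Bool) (line : String) :
    List String × List String × Bool :=
  let atoms := st.1
  let cur := st.2.1
  let inFence := st.2.2
  if inFence then
    let cur := cur ++ [line]
    if PySem.Str.startswith line "```" && decide (1 < cur.length) then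
      let f := pvFlushA atoms cur
      (f.1, f.2, false)
    else (atoms, cur, true)
  else if PySem.Str.startswith line "```" then
    let f := pvFlushA atoms cur
    (f.1, f.2 ++ [line], true)
  else if pvIsTable line then
    let f := if cur ≠ [] ∧ pvIsTable (PySem.List.pyGetD cur (-1) "") = false then
               pvFlushA atoms cur else (atoms, cur)
    (f.1, f.2 ++ [line], false)
  else if PySem.Str.strip line = "" then
    let f := pvFlushA atoms cur
    (f.1, f.2, false)
  else
    let f := if cur ≠ [] ∧ pvIsTable (PySem.List.pyGetD cur (-1) "") = true then
               pvFlushA atoms cur else (atoms, cur)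
    (f.1, f.2 ++ [line], false)

def split_into_atoms (text : String) : List String :=
  let lines := ((PySem.Str.split? text "\n").getD [])
  let st := lines.foldl pvStepA ([], [], false)
  (pvFlushA st.1 st.2.1).1

-- ===== PORT B =====
-- inner `while j < n and p(lines[j])` scan: (collected prefix, remaining suffix)
def pvScan (p : String → Bool) : List String → List String × List String
  | [] => ([], [])
  | l :: ls => if p l then
      let r := pvScan p ls
      (l :: r.1, r.2)
    else ([], l :: ls)

-- termination fact cited by pvGo's decreasing_by
theorem pvScan_snd_length_le (p : String → Bool) (ls : List String) :
    (pvScan p ls).2.length ≤ ls.length := by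
  induction ls with
  | nil => simp [pvScan]
  | cons l ls ih =>
    simp only [pvScan]
    split
    · simpa using Nat.le_succ_of_le ih
    · simp

-- `if block.strip(): atoms.append(block)` — emit in front of the rest of the output
def pvEmit (block : List String) (tail : List String) : List String :=
  let atom := PySem.Str.join "\n" block
  if PySem.Str.strip atom = "" then tail else atom :: tail

-- the outer `while i < n` loop of B, on the suffix of lines starting at i
def pvGo : List String → List String
  | [] => []
  | l :: rest =>
    if PySem.Str.startswith l "```" then
      -- Source B: end = j+1 if j<n else n; block = lines[i:end]; i = end
      match h : pvScan (fun x => !PySem.Str.startswith x "```") rest with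
      | (body, rest2) => pvEmit (l :: body ++ rest2.take 1) (pvGo (rest2.drop 1))
    else if pvIsTable l then
      match h : pvScan pvIsTable rest with
      | (body, rest') => pvEmit (l :: body) (pvGo rest')
    else if PySem.Str.strip l = "" then
      pvGo rest
    else
      match h : pvScan (fun x => !PySem.Str.startswith x "```" && !pvIsTable x &&
                                 !(PySem.Str.strip x == "")) rest with
      | (body, rest') => pvEmit (l :: body) (pvGo rest')
  termination_by ls => ls.length
  decreasing_by
  · have := pvScan_snd_length_le (fun x => !PySem.Str.startswith x "```") rest
    rw [h] at this
    have hd : (rest2.drop 1).length ≤ rest2.length := by simp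
    simp only [List.length_cons] at this ⊢
    omega
  · have := pvScan_snd_length_le pvIsTable rest
    rw [h] at this
    simp only [List.length_cons] at this ⊢
    omega
  · simp
  · have := pvScan_snd_length_le
      (fun x => !PySem.Str.startswith x "```" && !pvIsTable x && !(PySem.Str.strip x == "")) rest
    rw [h] at this
    simp only [List.length_cons] at this ⊢
    omega

def split_into_atoms_alt (text : String) : List String :=
  pvGo ((PySem.Str.split? text "\n").getD [])

-- ===== PRECONDITION & SPEC =====
def Spec_split_into_atoms (text : String) (out : List String) : Prop := out = split_into_atoms_alt text
instance (text : String) (out : List String) : Decidable (Spec_split_into_atoms text out) := by unfold Spec_split_into_atoms; infer_instance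

-- ===== CLAIM (what is proved, stated in full; the proofs are below) =====
def Claim_equal_split_into_atoms : Prop := ∀ (text : String), Dom_split_into_atoms text → Spec_split_into_atoms text (split_into_atoms text)

-- ===== LEMMAS AND PROOFS =====

theorem pvFlushA_nil (atoms : List String) : pvFlushA atoms [] = (atoms, []) := by
  simp [pvFlushA]

theorem pvFlushA_snd (atoms cur : List String) (h : cur ≠ []) : (pvFlushA atoms cur).2 = [] := by
  simp only [pvFlushA, if_pos h]
  split <;> rfl

theorem pvFlush_emit (atoms blk t : List String) (h : blk ≠ []) :
    (pvFlushA atoms blk).1 ++ t = atoms ++ pvEmit blk t := by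
  simp only [pvFlushA, pvEmit, if_pos h]
  split <;> simp_all

theorem pv_table_not_fence (l : String) (h : pvIsTable l = true) :
    PySem.Str.startswith l "```" = false := by
  by_contra hc
  have hsw : PySem.Str.startswith l "```" = true := by simpa using hc
  have hpre : ('`' :: '`' :: '`' :: []) <+: l.toList := by
    simpa [PySem.Str.startswith, PySem.Chars.startswith, List.isPrefixOf_iff_prefix] using hsw
  obtain ⟨t, ht⟩ := hpre
  have htab : PySem.Str.startswith (PySem.Str.strip l) "|" = true := by
    simp only [pvIsTable, Bool.and_eq_true] at h
    exact h.1
  have htab' : ('|' :: []) <+: (PySem.Chars.strip l.toList) := by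
    simpa [PySem.Str.startswith, PySem.Chars.startswith, PySem.Str.strip,
      List.isPrefixOf_iff_prefix] using htab
  have hl : PySem.Chars.lstrip l.toList = l.toList := by
    rw [← ht]
    simp [PySem.Chars.lstrip, PySem.Chars.isspace]
  have hstrip_pre : PySem.Chars.strip l.toList <+: l.toList := by
    rw [PySem.Chars.strip, hl]
    have := List.dropWhile_suffix (l := l.toList.reverse) (p := PySem.Chars.isspace)
    rw [PySem.Chars.rstrip]
    rw [show List.dropWhile PySem.Chars.isspace l.toList.reverse
          = (List.dropWhile PySem.Chars.isspace l.toList.reverse).reverse.reverse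
        from (List.reverse_reverse _).symm] at this
    exact List.reverse_suffix.mp this
  obtain ⟨u, hu⟩ := htab'.trans hstrip_pre
  rw [← ht] at hu
  simp at hu

-- boundary step after a table run: A flushes first, so stepping equals stepping from the flushed state

theorem pv_step_flush_table (atoms cur : List String) (l : String) (h : cur ≠ [])
    (hlast : pvIsTable (PySem.List.pyGetD cur (-1) "") = true) (hl : pvIsTable l = false) :
    pvStepA (atoms, cur, false) l = pvStepA ((pvFlushA atoms cur).1, [], false) l := by
  have hsnd := pvFlushA_snd atoms cur h
  by_cases hsw : PySem.Str.startswith l "```"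
  · simp only [pvStepA, hsw]
    simp [hsnd, pvFlushA_nil]
  · by_cases hb : PySem.Str.strip l = ""
    · simp only [pvStepA, hsw, hl, hb]
      simp [hsnd, pvFlushA_nil]
    · simp only [pvStepA, hsw, hl, hb]
      simp [hsnd, h, hlast, hb, pvFlushA_nil]

theorem pv_step_flush_para (atoms cur : List String) (l : String) (h : cur ≠ [])
    (hlast : pvIsTable (PySem.List.pyGetD cur (-1) "") = false)
    (hl : (!PySem.Str.startswith l "```" && !pvIsTable l && !(PySem.Str.strip l == "")) = false) :
    pvStepA (atoms, cur, false) l = pvStepA ((pvFlushA atoms cur).1, [], false) l := by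
  have hsnd := pvFlushA_snd atoms cur h
  by_cases hsw : PySem.Str.startswith l "```"
  · simp only [pvStepA, hsw]
    simp [hsnd, pvFlushA_nil]
  · by_cases htb : pvIsTable l
    · simp only [pvStepA, hsw, htb]
      simp [hsnd, h, hlast, pvFlushA_nil]
    · have hb : PySem.Str.strip l = "" := by
        have hsw2 : PySem.Chars.startswith l.toList ['`', '`', '`'] = false := by
          simpa using hsw
        simp [hsw2, htb] at hl
        simpa using hl
      simp only [pvStepA, hsw, htb, hb]
      simp [hsnd, pvFlushA_nil]

theorem pv_fence_scan (ls : List String) :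
    ∀ atoms cur, cur ≠ [] →
      List.foldl pvStepA (atoms, cur, true) ls =
        (match pvScan (fun x => !PySem.Str.startswith x "```") ls with
         | (body, []) => (atoms, cur ++ body, true)
         | (body, c :: rest') =>
             List.foldl pvStepA ((pvFlushA atoms (cur ++ body ++ [c])).1, ([] : List String), false) rest') := by
  induction ls with
  | nil => intro atoms cur h; simp [pvScan]
  | cons l ls ih =>
    intro atoms cur h
    by_cases hsw : PySem.Str.startswith l "```"
    · have hlen : decide (1 < (cur ++ [l]).length) = true := by
        simp [List.length_append]
        cases cur <;> simp_all
      simp only [List.foldl_cons, pvStepA, if_true, hsw, hlen, Bool.and_self, if_pos]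
      simp only [pvScan, hsw, Bool.not_true, if_neg]
      simp [pvFlushA_snd _ _ (by simp : cur ++ [l] ≠ [])]
    · simp only [List.foldl_cons, pvStepA, hsw]
      simp only [Bool.false_and, if_true, Bool.false_eq_true, if_false]
      rw [ih atoms (cur ++ [l]) (by simp)]
      simp only [pvScan, hsw, Bool.not_false, if_pos]
      cases hr : pvScan (fun x => !PySem.Str.startswith x "```") ls with
      | mk body rest2 =>
        cases rest2 <;> simp

theorem pv_table_scan (ls : List String) :
    ∀ atoms cur, cur ≠ [] → pvIsTable (PySem.List.pyGetD cur (-1) "") = true →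
      List.foldl pvStepA (atoms, cur, false) ls =
        (match pvScan pvIsTable ls with
         | (body, []) => (atoms, cur ++ body, false)
         | (body, c :: rest') =>
             List.foldl pvStepA ((pvFlushA atoms (cur ++ body)).1, ([] : List String), false) (c :: rest')) := by
  induction ls with
  | nil => intro atoms cur h hlast; simp [pvScan]
  | cons l ls ih =>
    intro atoms cur h hlast
    by_cases htb : pvIsTable l
    · have hsw := pv_table_not_fence l htb
      rw [List.foldl_cons]
      have hstep : pvStepA (atoms, cur, false) l = (atoms, cur ++ [l], false) := by
        simp [pvStepA, htb, hlast]
        simpa using hsw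
      rw [hstep, ih atoms (cur ++ [l]) (by simp)
            (by rw [PySem.List.pyGetD_neg_one_append_singleton]; exact htb)]
      simp only [pvScan, htb, if_pos]
      cases hr : pvScan pvIsTable ls with
      | mk body rest2 => cases rest2 <;> simp
    · simp only [pvScan, htb, Bool.false_eq_true, if_false]
      rw [List.foldl_cons, List.foldl_cons,
        pv_step_flush_table atoms cur l h hlast (by simpa using htb)]
      simp

theorem pv_para_scan (ls : List String) :
    ∀ atoms cur, cur ≠ [] → pvIsTable (PySem.List.pyGetD cur (-1) "") = false →
      List.foldl pvStepA (atoms, cur, false) ls =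
        (match pvScan (fun x => !PySem.Str.startswith x "```" && !pvIsTable x &&
                                !(PySem.Str.strip x == "")) ls with
         | (body, []) => (atoms, cur ++ body, false)
         | (body, c :: rest') =>
             List.foldl pvStepA ((pvFlushA atoms (cur ++ body)).1, ([] : List String), false) (c :: rest')) := by
  induction ls with
  | nil => intro atoms cur h hlast; simp [pvScan]
  | cons l ls ih =>
    intro atoms cur h hlast
    by_cases hp : (!PySem.Str.startswith l "```" && !pvIsTable l && !(PySem.Str.strip l == "")) = true
    · have hsw : PySem.Str.startswith l "```" = false := by
        simp [Bool.and_eq_true] at hp; simp [hp.1.1]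
      have htb : pvIsTable l = false := by
        simp [Bool.and_eq_true] at hp; simp [hp.1.2]
      have hb : ¬ (PySem.Str.strip l = "") := by
        simp [Bool.and_eq_true] at hp; simpa using hp.2
      rw [List.foldl_cons]
      have hstep : pvStepA (atoms, cur, false) l = (atoms, cur ++ [l], false) := by
        simp [pvStepA, htb, hb, hlast]
        simpa using hsw
      rw [hstep, ih atoms (cur ++ [l]) (by simp)
            (by rw [PySem.List.pyGetD_neg_one_append_singleton]; exact htb)]
      simp only [pvScan, hp, if_pos]
      cases hr : pvScan (fun x => !PySem.Str.startswith x "```" && !pvIsTable x &&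
                                  !(PySem.Str.strip x == "")) ls with
      | mk body rest2 => cases rest2 <;> simp
    · simp only [pvScan, hp, Bool.false_eq_true, if_false]
      rw [List.foldl_cons, List.foldl_cons,
        pv_step_flush_para atoms cur l h hlast (by simpa using hp)]
      simp

theorem pvGo_cons_fence (l : String) (rest body rest2 : List String)
    (hsw : PySem.Str.startswith l "```" = true)
    (hr : pvScan (fun x => !PySem.Str.startswith x "```") rest = (body, rest2)) :
    pvGo (l :: rest) = pvEmit (l :: body ++ rest2.take 1) (pvGo (rest2.drop 1)) := by
  rw [pvGo, if_pos hsw, hr]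

theorem pvGo_cons_table (l : String) (rest body rest2 : List String)
    (hsw : PySem.Str.startswith l "```" = false) (htb : pvIsTable l = true)
    (hr : pvScan pvIsTable rest = (body, rest2)) :
    pvGo (l :: rest) = pvEmit (l :: body) (pvGo rest2) := by
  rw [pvGo, if_neg (by simpa using hsw), if_pos htb, hr]

theorem pvGo_cons_blank (l : String) (rest : List String)
    (hsw : PySem.Str.startswith l "```" = false) (htb : pvIsTable l = false)
    (hb : PySem.Str.strip l = "") :
    pvGo (l :: rest) = pvGo rest := by
  rw [pvGo, if_neg (by simpa using hsw), if_neg (by simp [htb]), if_pos hb]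

theorem pvGo_cons_para (l : String) (rest body rest2 : List String)
    (hsw : PySem.Str.startswith l "```" = false) (htb : pvIsTable l = false)
    (hb : ¬ PySem.Str.strip l = "")
    (hr : pvScan (fun x => !PySem.Str.startswith x "```" && !pvIsTable x &&
                           !(PySem.Str.strip x == "")) rest = (body, rest2)) :
    pvGo (l :: rest) = pvEmit (l :: body) (pvGo rest2) := by
  rw [pvGo, if_neg (by simpa using hsw), if_neg (by simp [htb]), if_neg hb, hr]

theorem pvGo_nil : pvGo [] = [] := by rw [pvGo]

set_option maxHeartbeats 1000000 in
theorem pv_main_aux (n : Nat) :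
    ∀ (ls : List String), ls.length ≤ n → ∀ atoms,
      (pvFlushA ((List.foldl pvStepA (atoms, [], false) ls).1)
          ((List.foldl pvStepA (atoms, [], false) ls).2.1)).1
        = atoms ++ pvGo ls := by
  induction n with
  | zero =>
    intro ls hls atoms
    have h0 : ls = [] := List.eq_nil_of_length_eq_zero (Nat.le_zero.mp hls)
    subst h0
    simp [pvGo_nil, pvFlushA_nil]
  | succ n ih =>
    intro ls hls atoms
    cases ls with
    | nil => simp [pvGo_nil, pvFlushA_nil]
    | cons l rest =>
      have hrest : rest.length ≤ n := by simpa using hls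
      by_cases hsw : PySem.Str.startswith l "```" = true
      · have hstep : pvStepA (atoms, [], false) l = (atoms, [l], true) := by
          simp only [pvStepA]
          rw [if_neg (by simp), if_pos hsw]
          simp [pvFlushA_nil]
        rw [List.foldl_cons, hstep, pv_fence_scan rest atoms [l] (by simp)]
        cases hr : pvScan (fun x => !PySem.Str.startswith x "```") rest with
        | mk body rest2 =>
          rw [pvGo_cons_fence l rest body rest2 hsw hr]
          cases rest2 with
          | nil =>
            show (pvFlushA atoms ([l] ++ body)).1
              = atoms ++ pvEmit (l :: body ++ List.take 1 []) (pvGo (List.drop 1 []))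
            rw [List.take_nil, List.drop_nil, pvGo_nil, List.append_nil]
            have := pvFlush_emit atoms (l :: body) [] (by simp)
            rw [List.append_nil] at this
            simpa using this
          | cons c rest' =>
            have hlen : rest'.length ≤ n := by
              have := pvScan_snd_length_le (fun x => !PySem.Str.startswith x "```") rest
              rw [hr] at this
              simp at this
              omega
            rw [ih rest' hlen]
            have := pvFlush_emit atoms (l :: body ++ [c]) (pvGo rest') (by simp)
            simpa using this
      · replace hsw : PySem.Str.startswith l "```" = false := by simpa using hsw
        by_cases htb : pvIsTable l = true
        · have hstep : pvStepA (atoms, [], false) l = (atoms, [l], false) := by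
            simp only [pvStepA]
            rw [if_neg (by simp), if_neg (by simpa using hsw), if_pos htb]
            simp
          rw [List.foldl_cons, hstep,
            pv_table_scan rest atoms [l] (by simp) (by simpa using htb)]
          cases hr : pvScan pvIsTable rest with
          | mk body rest2 =>
            rw [pvGo_cons_table l rest body rest2 hsw htb hr]
            cases rest2 with
            | nil =>
              have := pvFlush_emit atoms (l :: body) (pvGo []) (by simp)
              simp only [pvGo_nil, List.append_nil] at this ⊢
              simpa using this
            | cons c rest' =>
              have hlen : (c :: rest').length ≤ n := by
                have := pvScan_snd_length_le pvIsTable rest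
                rw [hr] at this
                simp at this ⊢
                omega
              rw [ih (c :: rest') hlen]
              have := pvFlush_emit atoms (l :: body) (pvGo (c :: rest')) (by simp)
              simpa using this
        · replace htb : pvIsTable l = false := by simpa using htb
          by_cases hb : PySem.Str.strip l = ""
          · have hstep : pvStepA (atoms, [], false) l = (atoms, [], false) := by
              simp only [pvStepA]
              rw [if_neg (by simp), if_neg (by simpa using hsw), if_neg (by simp [htb]), if_pos hb]
              simp [pvFlushA_nil]
            rw [List.foldl_cons, hstep, ih rest hrest, pvGo_cons_blank l rest hsw htb hb]
          · have hstep : pvStepA (atoms, [], false) l = (atoms, [l], false) := by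
              simp only [pvStepA]
              rw [if_neg (by simp), if_neg (by simpa using hsw), if_neg (by simp [htb]), if_neg hb]
              simp
            rw [List.foldl_cons, hstep,
              pv_para_scan rest atoms [l] (by simp) (by simpa using htb)]
            cases hr : pvScan (fun x => !PySem.Str.startswith x "```" && !pvIsTable x &&
                                        !(PySem.Str.strip x == "")) rest with
            | mk body rest2 =>
              rw [pvGo_cons_para l rest body rest2 hsw htb hb hr]
              cases rest2 with
              | nil =>
                have := pvFlush_emit atoms (l :: body) (pvGo []) (by simp)
                simp only [pvGo_nil, List.append_nil] at this ⊢
                simpa using this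
              | cons c rest' =>
                have hlen : (c :: rest').length ≤ n := by
                  have := pvScan_snd_length_le (fun x => !PySem.Str.startswith x "```" &&
                    !pvIsTable x && !(PySem.Str.strip x == "")) rest
                  rw [hr] at this
                  simp at this ⊢
                  omega
                rw [ih (c :: rest') hlen]
                have := pvFlush_emit atoms (l :: body) (pvGo (c :: rest')) (by simp)
                simpa using this

theorem pv_main (ls : List String) (atoms : List String) :
    (pvFlushA ((ls.foldl pvStepA (atoms, [], false)).1)
        ((ls.foldl pvStepA (atoms, [], false)).2.1)).1
      = atoms ++ pvGo ls :=
  pv_main_aux ls.length ls (Nat.le_refl _) atoms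

-- ===== VERDICT (by name: the statement is the Claim_ definition above) =====
theorem split_into_atoms_spec : Claim_equal_split_into_atoms := by
  intro text _
  unfold Spec_split_into_atoms split_into_atoms split_into_atoms_alt
  simpa using pv_main ((PySem.Str.split? text "\n").getD []) []
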